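-- pv_equiv track=rewrite | github.com/sochara-org/community-health-ai | ingest/functions.py | split_large_para_optimally
-- ===== SOURCE A (Python) =====
-- def split_large_para_optimally(para, size):
--     s = para
--     parts = []
--     while (len(s) > size):
--         sentence_end = s.rfind('.', 0, size)
--         if sentence_end > -1:
--             parts.append(s[0:sentence_end + 1])
--             s = s[sentence_end + 1:]
--         else:
--             word_end = s.rfind(' ', 0, size)
--             if word_end > -1:
--                 parts.append(s[0:word_end])
--                 s = s[word_end + 1:]
--             else:
--                 parts.append(s[0:size])
--                 s = s[size:]
--     if len(s) > 0:
--         parts.append(s)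
--     return [part for part in parts if part != ""]
-- ===== SOURCE B (Python) =====
-- def split_large_para_optimally(para, size):
--     # Pass 1: compute (start, end) index spans of the chunks, never slicing the text.
--     n = len(para)
--     spans = []
--     i = 0
--     while n - i > size:
--         dot = para.rfind('.', i, i + size)
--         if dot > -1:
--             spans.append((i, dot + 1))
--             i = dot + 1
--         else:
--             sp = para.rfind(' ', i, i + size)
--             if sp > -1:
--                 spans.append((i, sp))
--                 i = sp + 1
--             else:
--                 spans.append((i, i + size))
--                 i += size
--     if i < n:
--         spans.append((i, n))
--     # Pass 2: materialise only the non-empty spans.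
--     return [para[a:b] for a, b in spans if b > a]
-- ===== Notes on version B (the rewrite author's own statement) =====
-- stated objective: faster
-- what changed: B is a two-stage algorithm: a first pass over integer indices computes the (start,end) spans of all chunks using offset rfind (never copying the shrinking remainder as A does each iteration), and a second pass materialises only the non-empty spans; A re-slices the remaining string every step and filters afterwards.
import Mathlib
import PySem

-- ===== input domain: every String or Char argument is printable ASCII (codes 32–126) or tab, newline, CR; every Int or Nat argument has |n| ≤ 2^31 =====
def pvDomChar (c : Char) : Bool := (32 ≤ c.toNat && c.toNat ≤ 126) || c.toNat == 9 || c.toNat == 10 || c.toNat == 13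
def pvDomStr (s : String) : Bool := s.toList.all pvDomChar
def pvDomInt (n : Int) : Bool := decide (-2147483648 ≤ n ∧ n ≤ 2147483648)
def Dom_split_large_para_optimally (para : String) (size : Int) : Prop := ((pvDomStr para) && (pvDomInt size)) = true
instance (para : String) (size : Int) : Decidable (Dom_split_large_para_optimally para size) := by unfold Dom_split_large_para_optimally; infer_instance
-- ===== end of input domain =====

-- B computes the (start,end) spans of all chunks in one integer-index pass (offset rfind, no
-- remainder copies) and then materialises the non-empty spans in a second pass; same return
-- value as A on every input admitted by Pre_.

-- ===== PORT A =====
-- A's while-loop over the shrinking remainder s; fuel (length+1) bounds the iterations,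
-- which suffices on Pre_ (each iteration removes at least one character when size ≥ 1).
def pvAloop (size : Int) : Nat → List Char → List (List Char) → List (List Char) × List Char
  | 0, s, parts => (parts, s)
  | fuel+1, s, parts =>
    if (s.length : Int) > size then
      if PySem.Chars.rfindFrom s ['.'] 0 (some size) > -1 then
        pvAloop size fuel
          (PySem.List.slice s (some (PySem.Chars.rfindFrom s ['.'] 0 (some size) + 1)) none)
          (parts ++ [PySem.List.slice s (some 0) (some (PySem.Chars.rfindFrom s ['.'] 0 (some size) + 1))])
      else
        if PySem.Chars.rfindFrom s [' '] 0 (some size) > -1 then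
          pvAloop size fuel
            (PySem.List.slice s (some (PySem.Chars.rfindFrom s [' '] 0 (some size) + 1)) none)
            (parts ++ [PySem.List.slice s (some 0) (some (PySem.Chars.rfindFrom s [' '] 0 (some size)))])
        else
          pvAloop size fuel (PySem.List.slice s (some size) none)
            (parts ++ [PySem.List.slice s (some 0) (some size)])
    else (parts, s)

def split_large_para_optimally (para : String) (size : Int) : List String :=
  (((if ((pvAloop size (para.toList.length + 1) para.toList []).2.length : Int) > 0
      then (pvAloop size (para.toList.length + 1) para.toList []).1
             ++ [(pvAloop size (para.toList.length + 1) para.toList []).2]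
      else (pvAloop size (para.toList.length + 1) para.toList []).1).filter
        (fun p => decide (p ≠ []))).map (fun cs => String.ofList cs))

-- ===== PORT B =====
-- Pass 1 of B: the span-computing loop; state is just the index pointer i and the list of
-- (start, end) integer pairs.  No text is sliced here.
def pvSpanLoop (para : List Char) (size : Int) : Nat → Int → List (Int × Int) → List (Int × Int) × Int
  | 0, i, spans => (spans, i)
  | fuel+1, i, spans =>
    if (para.length : Int) - i > size then
      let dot := PySem.Chars.rfindFrom para ['.'] i (some (i + size))
      if dot > -1 then
        pvSpanLoop para size fuel (dot + 1) (spans ++ [(i, dot + 1)])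
      else
        let sp := PySem.Chars.rfindFrom para [' '] i (some (i + size))
        if sp > -1 then
          pvSpanLoop para size fuel (sp + 1) (spans ++ [(i, sp)])
        else
          pvSpanLoop para size fuel (i + size) (spans ++ [(i, i + size)])
    else (spans, i)

-- Pass 2 of B: keep the non-empty spans, then slice each one out of the original text.
def pvMaterialise (para : List Char) (spans : List (Int × Int)) : List String :=
  (spans.filter (fun ab => decide (ab.2 > ab.1))).map
    (fun ab => String.ofList (PySem.List.slice para (some ab.1) (some ab.2)))

def split_large_para_optimally_alt (para : String) (size : Int) : List String :=
  pvMaterialise para.toList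
    (if (pvSpanLoop para.toList size (para.toList.length + 1) 0 []).2 < (para.toList.length : Int)
     then (pvSpanLoop para.toList size (para.toList.length + 1) 0 []).1
            ++ [((pvSpanLoop para.toList size (para.toList.length + 1) 0 []).2, (para.toList.length : Int))]
     else (pvSpanLoop para.toList size (para.toList.length + 1) 0 []).1)

-- ===== PRECONDITION & SPEC =====
-- Pre_ excludes exactly the inputs on which A's while-loop never terminates (Python hangs):
-- size ≤ 0 with a non-empty paragraph, and size < 0 with the empty one.
def Pre_split_large_para_optimally (para : String) (size : Int) : Prop :=
  1 ≤ size ∨ (size = 0 ∧ para.toList = [])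
instance (para : String) (size : Int) : Decidable (Pre_split_large_para_optimally para size) := by
  unfold Pre_split_large_para_optimally; infer_instance

def pvWitness_split_large_para_optimally : String × Int := ("a b. c", 3)

def Spec_split_large_para_optimally (para : String) (size : Int) (out : List String) : Prop := out = split_large_para_optimally_alt para size
instance (para : String) (size : Int) (out : List String) : Decidable (Spec_split_large_para_optimally para size out) := by unfold Spec_split_large_para_optimally; infer_instance

-- ===== CLAIM (what is proved, stated in full; the proofs are below) =====
def Claim_equal_split_large_para_optimally : Prop := ∀ (para : String) (size : Int), Dom_split_large_para_optimally para size → Pre_split_large_para_optimally para size → Spec_split_large_para_optimally para size (split_large_para_optimally para size)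

-- ===== LEMMAS AND PROOFS =====

-- rfind of a non-empty needle is -1 or a valid index below length.
lemma pv_rfind_go_bounds (s sub : List Char) (hsub : sub ≠ []) (j : Nat) :
    PySem.Chars.rfind.go s sub j = -1 ∨
      (0 ≤ PySem.Chars.rfind.go s sub j ∧ PySem.Chars.rfind.go s sub j < (s.length : Int)) := by
  induction j with
  | zero =>
      unfold PySem.Chars.rfind.go
      split_ifs with h
      · right
        have hpre := List.isPrefixOf_iff_prefix.mp h
        have := hpre.length_le
        have : 0 < s.length := by
          cases sub with
          | nil => exact absurd rfl hsub
          | cons a l => simp at this; omega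
        constructor <;> [exact le_refl 0; exact_mod_cast this]
      · left; rfl
  | succ j ih =>
      unfold PySem.Chars.rfind.go
      split_ifs with h
      · right
        have hpre := List.isPrefixOf_iff_prefix.mp h
        have hlen := hpre.length_le
        have hne : s.drop (j+1) ≠ [] := by
          intro hnil; rw [hnil] at hpre
          have := List.prefix_nil.mp hpre; exact hsub this
        have : j + 1 < s.length := by
          by_contra hc
          exact hne (List.drop_eq_nil_iff.mpr (by omega))
        constructor
        · positivity
        · exact_mod_cast this
      · exact ih

lemma pv_rfind_bounds (s sub : List Char) (hsub : sub ≠ []) :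
    PySem.Chars.rfind s sub = -1 ∨
      (0 ≤ PySem.Chars.rfind s sub ∧ PySem.Chars.rfind s sub < (s.length : Int)) := by
  unfold PySem.Chars.rfind
  exact pv_rfind_go_bounds s sub hsub s.length

lemma pv_rfindFrom0_eq (s sub : List Char) (size : Int) (hsz : 1 ≤ size) :
    PySem.Chars.rfindFrom s sub 0 (some size)
      = PySem.Chars.rfind (s.take (min size ↑s.length).toNat) sub := by
  unfold PySem.Chars.rfindFrom
  have hsn : ¬ (size < 0) := by omega
  rcases lt_or_ge (↑s.length : Int) size with h | h
  · have hmin : min size (↑s.length : Int) = ↑s.length := by omega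
    have hL : ¬ ((↑s.length : Int) < 0) := by omega
    simp [h, hmin, hL]
    intro hr; omega
  · have hmin : min size (↑s.length : Int) = size := by omega
    have hns : ¬ ((↑s.length : Int) < size) := by omega
    simp [hsn, hns, hmin]
    intro hr; omega

-- rfindFrom from 0 with a positive end bound: -1 or a valid index below length.
lemma pv_rfindFrom0_bounds (s sub : List Char) (hsub : sub ≠ []) (size : Int) (hsz : 1 ≤ size) :
    PySem.Chars.rfindFrom s sub 0 (some size) = -1 ∨
      (0 ≤ PySem.Chars.rfindFrom s sub 0 (some size) ∧
        PySem.Chars.rfindFrom s sub 0 (some size) < (s.length : Int)) := by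
  rw [pv_rfindFrom0_eq _ _ _ hsz]
  rcases pv_rfind_bounds (s.take (min size ↑s.length).toNat) sub hsub with h | ⟨h1, h2⟩
  · exact Or.inl h
  · right
    refine ⟨h1, lt_of_lt_of_le h2 ?_⟩
    have := List.length_take (i := (min size (↑s.length:Int)).toNat) (l := s)
    omega

-- shift lemma: rfind over para[i:i+size] equals rfind over (para drop i)[0:size] shifted by i.
lemma pv_rfindFrom_shift (para sub : List Char) (size i : Int)
    (hsz : 1 ≤ size) (h0 : 0 ≤ i) (hi : i ≤ (para.length : Int)) :
    PySem.Chars.rfindFrom para sub i (some (i + size)) =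
      (if PySem.Chars.rfindFrom (para.drop i.toNat) sub 0 (some size) = -1 then (-1 : Int)
       else i + PySem.Chars.rfindFrom (para.drop i.toNat) sub 0 (some size)) := by
  rw [pv_rfindFrom0_eq _ _ _ hsz]
  unfold PySem.Chars.rfindFrom
  have hL' : (↑(para.drop i.toNat).length : Int) = ↑para.length - i := by
    simp [List.length_drop]; omega
  have hin : ¬ (i < 0) := by omega
  have hisn : ¬ (i + size < 0) := by omega
  set E : Int := if (↑para.length : Int) < i + size then (↑para.length : Int) else i + size with hE
  have hEmin : E = min (↑para.length : Int) (i + size) := by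
    rw [hE]; split_ifs with hh <;> omega
  have hEge : ¬ (E < i) := by omega
  have hkey : List.drop i.toNat (List.take E.toNat para)
      = List.take (min size ↑(para.drop i.toNat).length).toNat (List.drop i.toNat para) := by
    rw [List.drop_take]
    congr 1
    rw [hL']
    omega
  simp only [hin, hisn, if_false, ← hE]
  rw [if_neg hEge, hkey]

-- a span is GOOD when it lies inside the text, its slice then is non-empty iff end > start
def pvGood (n : Int) (ab : Int × Int) : Prop := 0 ≤ ab.1 ∧ ab.1 ≤ ab.2 ∧ ab.2 ≤ n

-- for a good span the slice is the chars between the indices; non-empty iff end > start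
lemma pv_good_slice_ne (para : List Char) (ab : Int × Int) (h : pvGood (para.length : Int) ab) :
    (PySem.List.slice para (some ab.1) (some ab.2) ≠ []) ↔ ab.2 > ab.1 := by
  obtain ⟨h1, h2, h3⟩ := h
  rw [PySem.List.slice_toNat _ h1 (by omega)]
  rw [← List.length_pos_iff, List.length_take, List.length_drop]
  omega

-- the main simulation: A's loop on the dropped remainder tracks B's span loop, with
-- parts = spans.map (slice para); the final pointer stays in range and all spans are good.
lemma pv_loops_agree (para : List Char) (size : Int) (hsz : 1 ≤ size) :
    ∀ (fuel : Nat) (i : Int) (spans : List (Int × Int)), 0 ≤ i → i ≤ (para.length : Int) →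
      (∀ ab ∈ spans, pvGood (para.length : Int) ab) →
      pvAloop size fuel (para.drop i.toNat)
          (spans.map (fun ab => PySem.List.slice para (some ab.1) (some ab.2)))
          = ((pvSpanLoop para size fuel i spans).1.map
              (fun ab => PySem.List.slice para (some ab.1) (some ab.2)),
             para.drop (pvSpanLoop para size fuel i spans).2.toNat)
        ∧ 0 ≤ (pvSpanLoop para size fuel i spans).2
        ∧ (pvSpanLoop para size fuel i spans).2 ≤ (para.length : Int)
        ∧ (∀ ab ∈ (pvSpanLoop para size fuel i spans).1, pvGood (para.length : Int) ab) := by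
  intro fuel
  induction fuel with
  | zero => intro i spans h0 hi hg; exact ⟨rfl, h0, hi, hg⟩
  | succ fuel ih =>
    intro i spans h0 hi hg
    have hlen : ((para.drop i.toNat).length : Int) = ↑para.length - i := by
      simp [List.length_drop]; omega
    by_cases hc : (↑para.length : Int) - i > size
    · have hcA : ((para.drop i.toNat).length : Int) > size := by omega
      rw [pvAloop, pvSpanLoop, if_pos hcA]
      simp only [if_pos hc]
      rw [pv_rfindFrom_shift para ['.'] size i hsz h0 hi]
      rcases pv_rfindFrom0_bounds (para.drop i.toNat) ['.'] (by simp) size hsz with hdot | ⟨hd0, hdL⟩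
      · rw [hdot, if_pos rfl, if_neg (by omega : ¬ ((-1:Int) > -1)),
            if_neg (by omega : ¬ ((-1:Int) > -1)),
            pv_rfindFrom_shift para [' '] size i hsz h0 hi]
        rcases pv_rfindFrom0_bounds (para.drop i.toNat) [' '] (by simp) size hsz with hsp | ⟨hs0, hsL⟩
        · rw [hsp, if_pos rfl, if_neg (by omega : ¬ ((-1:Int) > -1)),
              if_neg (by omega : ¬ ((-1:Int) > -1))]
          have hpart : PySem.List.slice (para.drop i.toNat) (some 0) (some size)
              = PySem.List.slice para (some i) (some (i + size)) := by
            rw [PySem.List.slice_toNat _ (by omega) (by omega),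
                PySem.List.slice_toNat _ h0 (by omega)]
            simp only [Int.toNat_zero, List.drop_zero]
            congr 1
            omega
          have hstate : PySem.List.slice (para.drop i.toNat) (some size) none
              = para.drop (i + size).toNat := by
            rw [PySem.List.slice_from _ (by omega), List.drop_drop]
            congr 1
            omega
          rw [hpart, hstate]
          have hg' : ∀ ab ∈ spans ++ [(i, i + size)], pvGood (para.length : Int) ab := by
            intro ab hab
            rcases List.mem_append.mp hab with h | h
            · exact hg ab h
            · simp at h; subst h; exact ⟨h0, by omega, by omega⟩
          have := ih (i + size) (spans ++ [(i, i + size)]) (by omega) (by omega) hg'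
          simpa using this
        · have hne : PySem.Chars.rfindFrom (para.drop i.toNat) [' '] 0 (some size) ≠ -1 := by omega
          rw [if_neg hne, if_pos (by omega)]
          simp only [if_pos (show i + PySem.Chars.rfindFrom (para.drop i.toNat) [' '] 0 (some size) > -1 by omega)]
          have hpart : PySem.List.slice (para.drop i.toNat) (some 0)
                (some (PySem.Chars.rfindFrom (para.drop i.toNat) [' '] 0 (some size)))
              = PySem.List.slice para (some i)
                (some (i + PySem.Chars.rfindFrom (para.drop i.toNat) [' '] 0 (some size))) := by
            rw [PySem.List.slice_toNat _ (by omega) (by omega),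
                PySem.List.slice_toNat _ h0 (by omega)]
            simp only [Int.toNat_zero, List.drop_zero]
            congr 1
            omega
          have hstate : PySem.List.slice (para.drop i.toNat)
                (some (PySem.Chars.rfindFrom (para.drop i.toNat) [' '] 0 (some size) + 1)) none
              = para.drop (i + PySem.Chars.rfindFrom (para.drop i.toNat) [' '] 0 (some size) + 1).toNat := by
            rw [PySem.List.slice_from _ (by omega), List.drop_drop]
            congr 1
            omega
          rw [hpart, hstate]
          have hg' : ∀ ab ∈ spans ++ [(i, i + PySem.Chars.rfindFrom (para.drop i.toNat) [' '] 0 (some size))],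
              pvGood (para.length : Int) ab := by
            intro ab hab
            rcases List.mem_append.mp hab with h | h
            · exact hg ab h
            · simp at h; subst h; exact ⟨h0, by omega, by omega⟩
          have := ih (i + PySem.Chars.rfindFrom (para.drop i.toNat) [' '] 0 (some size) + 1)
            (spans ++ [(i, i + PySem.Chars.rfindFrom (para.drop i.toNat) [' '] 0 (some size))])
            (by omega) (by omega) hg'
          simpa using this
      · have hne : PySem.Chars.rfindFrom (para.drop i.toNat) ['.'] 0 (some size) ≠ -1 := by omega
        rw [if_neg hne, if_pos (by omega)]
        simp only [if_pos (show i + PySem.Chars.rfindFrom (para.drop i.toNat) ['.'] 0 (some size) > -1 by omega)]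
        have hpart : PySem.List.slice (para.drop i.toNat) (some 0)
              (some (PySem.Chars.rfindFrom (para.drop i.toNat) ['.'] 0 (some size) + 1))
            = PySem.List.slice para (some i)
              (some (i + PySem.Chars.rfindFrom (para.drop i.toNat) ['.'] 0 (some size) + 1)) := by
          rw [PySem.List.slice_toNat _ (by omega) (by omega),
              PySem.List.slice_toNat _ h0 (by omega)]
          simp only [Int.toNat_zero, List.drop_zero]
          congr 1
          omega
        have hstate : PySem.List.slice (para.drop i.toNat)
              (some (PySem.Chars.rfindFrom (para.drop i.toNat) ['.'] 0 (some size) + 1)) none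
            = para.drop (i + PySem.Chars.rfindFrom (para.drop i.toNat) ['.'] 0 (some size) + 1).toNat := by
          rw [PySem.List.slice_from _ (by omega), List.drop_drop]
          congr 1
          omega
        rw [hpart, hstate]
        have hg' : ∀ ab ∈ spans ++ [(i, i + PySem.Chars.rfindFrom (para.drop i.toNat) ['.'] 0 (some size) + 1)],
            pvGood (para.length : Int) ab := by
          intro ab hab
          rcases List.mem_append.mp hab with h | h
          · exact hg ab h
          · simp at h; subst h; exact ⟨h0, by omega, by omega⟩
        have := ih (i + PySem.Chars.rfindFrom (para.drop i.toNat) ['.'] 0 (some size) + 1)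
          (spans ++ [(i, i + PySem.Chars.rfindFrom (para.drop i.toNat) ['.'] 0 (some size) + 1)])
          (by omega) (by omega) hg'
        simpa using this
    · have hcA : ¬ (((para.drop i.toNat).length : Int) > size) := by omega
      rw [pvAloop, pvSpanLoop, if_neg hcA]
      simp only [if_neg hc]
      exact ⟨by trivial, h0, hi, hg⟩

-- filtering the mapped slices by non-emptiness = filtering the good spans by end > start
lemma pv_filter_map (para : List Char) (spans : List (Int × Int))
    (hg : ∀ ab ∈ spans, pvGood (para.length : Int) ab) :
    ((spans.map (fun ab => PySem.List.slice para (some ab.1) (some ab.2))).filter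
        (fun p => decide (p ≠ []))).map (fun cs => String.ofList cs)
      = pvMaterialise para spans := by
  unfold pvMaterialise
  rw [List.filter_map, List.map_map]
  congr 1
  apply List.filter_congr
  intro ab hab
  simp only [Function.comp]
  rw [decide_eq_decide]
  exact pv_good_slice_ne para ab (hg ab hab)

-- ===== VERDICT (by name: the statement is the Claim_ definition above) =====
theorem split_large_para_optimally_spec : Claim_equal_split_large_para_optimally := by
  intro para size _ hpre
  unfold Spec_split_large_para_optimally
  rcases hpre with hsz | ⟨hsz0, hnil⟩
  · unfold split_large_para_optimally split_large_para_optimally_alt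
    obtain ⟨heq, hb0, hbL, hgood⟩ := pv_loops_agree para.toList size hsz (para.toList.length + 1) 0 []
      (le_refl 0) (by exact_mod_cast Int.natCast_nonneg para.toList.length) (by intro ab h; simp at h)
    rw [show ((0:Int).toNat) = 0 from rfl, List.drop_zero, List.map_nil] at heq
    set r := pvSpanLoop para.toList size (para.toList.length + 1) 0 [] with hr
    have hlen : ((para.toList.drop r.2.toNat).length : Int) = ↑para.toList.length - r.2 := by
      rw [List.length_drop]; omega
    by_cases hlt : r.2 < (para.toList.length : Int)
    · rw [if_pos hlt]
      simp only [heq]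
      rw [if_pos (show ((para.toList.drop r.2.toNat).length : Int) > 0 by omega)]
      have hfin : para.toList.drop r.2.toNat
          = PySem.List.slice para.toList (some r.2) (some (para.toList.length : Int)) := by
        rw [PySem.List.slice_toNat _ hb0 (by omega)]
        rw [List.take_of_length_le (by rw [List.length_drop]; omega)]
      rw [hfin, show (r.1.map (fun ab => PySem.List.slice para.toList (some ab.1) (some ab.2)))
            ++ [PySem.List.slice para.toList (some r.2) (some (para.toList.length : Int))]
            = (r.1 ++ [(r.2, (para.toList.length : Int))]).map
                (fun ab => PySem.List.slice para.toList (some ab.1) (some ab.2)) by simp]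
      exact pv_filter_map para.toList _ (by
        intro ab hab
        rcases List.mem_append.mp hab with h | h
        · exact hgood ab h
        · rw [List.mem_singleton] at h; subst h; exact ⟨hb0, hbL, le_refl _⟩)
    · rw [if_neg hlt]
      simp only [heq]
      rw [if_neg (show ¬ (((para.toList.drop r.2.toNat).length : Int) > 0) by omega)]
      exact pv_filter_map para.toList _ hgood
  · subst hsz0
    unfold split_large_para_optimally split_large_para_optimally_alt
    rw [hnil]
    rfl
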